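-- pv_equiv track=rewrite | github.com/Nikitanale2708/agrotwin-backend | simulation.py | simulate_growth
-- ===== SOURCE A (Python) =====
-- def simulate_growth(days, severity, weather):
--
--     results = []
--
--     health = 80
--
--     temp = weather.get("temperature", 30)
--     rain = weather.get("rainfall", 100)
--
--     for day in range(days):
--
--         if temp > 35:
--             health -= 3
--         elif temp < 20:
--             health -= 2
--         else:
--             health += 1
--
--         if rain > 150:
--             health -= 4
--         elif rain < 50:
--             health -= 3
--         else:
--             health += 1
--
--         if severity == "high":
--             health -= 8
--         elif severity == "medium":
--             health -= 5
--         elif severity == "low":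
--             health -= 2
--
--         health = max(0, min(100, health))
--
--         results.append({
--             "day": day + 1,
--             "health": health
--         })
--
--     return results
-- ===== SOURCE B (Python) =====
-- def simulate_growth(days, severity, weather):
--     temp = weather.get("temperature", 30)
--     rain = weather.get("rainfall", 100)
--     delta = (-3 if temp > 35 else -2 if temp < 20 else 1) \
--           + (-4 if rain > 150 else -3 if rain < 50 else 1) \
--           + {"high": -8, "medium": -5, "low": -2}.get(severity, 0)
--     return [{"day": d + 1, "health": max(0, min(100, 80 + delta * (d + 1)))}
--             for d in range(days)]
-- ===== Notes on version B (the rewrite author's own statement) =====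
-- stated objective: alternative
-- what changed: B evaluates the three condition branches once to a constant per-day delta and builds each record by the closed-form clamped linear formula max(0,min(100,80+delta*(d+1))), instead of mutating a running health accumulator step by step.
import Mathlib
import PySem

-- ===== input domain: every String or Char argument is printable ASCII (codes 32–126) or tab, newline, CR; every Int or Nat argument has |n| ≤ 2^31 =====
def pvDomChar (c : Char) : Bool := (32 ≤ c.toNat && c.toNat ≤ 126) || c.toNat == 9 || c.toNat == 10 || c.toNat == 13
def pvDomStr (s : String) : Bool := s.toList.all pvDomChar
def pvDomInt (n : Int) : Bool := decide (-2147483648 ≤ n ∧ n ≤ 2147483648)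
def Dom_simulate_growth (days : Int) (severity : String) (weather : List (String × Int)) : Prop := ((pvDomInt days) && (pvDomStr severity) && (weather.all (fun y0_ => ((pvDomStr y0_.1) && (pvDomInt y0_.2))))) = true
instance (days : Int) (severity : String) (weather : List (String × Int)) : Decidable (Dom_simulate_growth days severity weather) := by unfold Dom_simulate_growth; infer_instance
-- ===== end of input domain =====

-- B replaces A's running mutable health accumulator by a once-computed constant daily
-- delta and the closed-form clamped value max(0, min(100, 80 + delta*(day+1))); same cost.

-- ===== PORT A =====
-- literal transliteration of A: fold over range(days) carrying (health, results);
-- weather.get(k, d) on the assoc-list dict is first-match lookup with default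
def simulate_growth (days : Int) (severity : String) (weather : List (String × Int)) : List (List (String × Int)) :=
  let temp := (weather.lookup "temperature").getD 30
  let rain := (weather.lookup "rainfall").getD 100
  ((PySem.List.pyRange 0 days 1).foldl (fun st day =>
      let h1 := if temp > 35 then st.1 - 3 else if temp < 20 then st.1 - 2 else st.1 + 1
      let h2 := if rain > 150 then h1 - 4 else if rain < 50 then h1 - 3 else h1 + 1
      let h3 := if severity == "high" then h2 - 8
                else if severity == "medium" then h2 - 5
                else if severity == "low" then h2 - 2 else h2
      let h4 := max 0 (min 100 h3)
      (h4, st.2 ++ [[("day", day + 1), ("health", h4)]]))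
    ((80 : Int), ([] : List (List (String × Int))))).2

-- ===== PORT B =====
-- literal transliteration of B: constant delta computed once, then a map with the closed form
def simulate_growth_alt (days : Int) (severity : String) (weather : List (String × Int)) : List (List (String × Int)) :=
  let temp := (weather.lookup "temperature").getD 30
  let rain := (weather.lookup "rainfall").getD 100
  let delta := (if temp > 35 then (-3 : Int) else if temp < 20 then -2 else 1)
             + (if rain > 150 then (-4 : Int) else if rain < 50 then -3 else 1)
             + ((([("high", (-8 : Int)), ("medium", -5), ("low", -2)] : List (String × Int)).lookup severity).getD 0)
  (PySem.List.pyRange 0 days 1).map (fun d =>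
    [("day", d + 1), ("health", max 0 (min 100 (80 + delta * (d + 1))))])

-- ===== PRECONDITION & SPEC =====
def Spec_simulate_growth (days : Int) (severity : String) (weather : List (String × Int)) (out : List (List (String × Int))) : Prop := out = simulate_growth_alt days severity weather
instance (days : Int) (severity : String) (weather : List (String × Int)) (out : List (List (String × Int))) : Decidable (Spec_simulate_growth days severity weather out) := by unfold Spec_simulate_growth; infer_instance

-- ===== CLAIM (what is proved, stated in full; the proofs are below) =====
def Claim_equal_simulate_growth : Prop := ∀ (days : Int) (severity : String) (weather : List (String × Int)), Dom_simulate_growth days severity weather → Spec_simulate_growth days severity weather (simulate_growth days severity weather)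

-- ===== LEMMAS AND PROOFS =====

-- the record B emits for day index k (proof-only helper)
def pvRec (dlt : Int) (k : Nat) : List (String × Int) :=
  [("day", (k : Int) + 1), ("health", max 0 (min 100 (80 + dlt * ((k : Int) + 1))))]

-- B's severity lookup table equals A's if-chain on the severity string
lemma sev_table_eq (sev : String) :
    ((([("high", (-8 : Int)), ("medium", -5), ("low", -2)] : List (String × Int)).lookup sev).getD 0)
      = (if sev == "high" then (-8 : Int) else if sev == "medium" then -5
         else if sev == "low" then -2 else 0) := by
  by_cases h1 : sev = "high"
  · simp [List.lookup, h1]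
  · by_cases h2 : sev = "medium"
    · simp [List.lookup, h2]
    · by_cases h3 : sev = "low"
      · simp [List.lookup, h3]
      · have b1 : (sev == "high") = false := by simp [h1]
        have b2 : (sev == "medium") = false := by simp [h2]
        have b3 : (sev == "low") = false := by simp [h3]
        simp [List.lookup, b1, b2, b3]

-- one clamped step from the clamped linear value is the clamped linear value one step on
lemma clamp_step (dlt : Int) (n : Nat) :
    max 0 (min 100 (max 0 (min 100 (80 + dlt * n)) + dlt))
      = max 0 (min 100 (80 + dlt * ((n : Int) + 1))) := by
  have hmul : dlt * ((n : Int) + 1) = dlt * n + dlt := by ring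
  rcases le_total 0 dlt with hd | hd
  · have hx : 0 ≤ dlt * (n : Int) := mul_nonneg hd (Int.natCast_nonneg n)
    omega
  · have hx : dlt * (n : Int) ≤ 0 := by nlinarith [Int.natCast_nonneg n]
    omega

-- the loop invariant: after n steps the state is the clamped linear health and the mapped records
lemma loop_closed (dlt : Int) (n : Nat) :
    (List.range n).foldl (fun (st : Int × List (List (String × Int))) (k : Nat) =>
        let h4 := max 0 (min 100 (st.1 + dlt))
        (h4, st.2 ++ [[("day", (k : Int) + 1), ("health", h4)]]))
      ((80 : Int), ([] : List (List (String × Int))))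
    = (max 0 (min 100 (80 + dlt * n)), (List.range n).map (pvRec dlt)) := by
  induction n with
  | zero => simp
  | succ n ih =>
    rw [List.range_succ, List.foldl_append, List.map_append, ih]
    simp only [List.foldl_cons, List.foldl_nil, List.map_cons, List.map_nil]
    have h := clamp_step dlt n
    push_cast at h ⊢
    rw [Prod.mk.injEq]
    refine ⟨h, ?_⟩
    simp [pvRec, h]

-- ===== VERDICT (by name: the statement is the Claim_ definition above) =====
set_option maxHeartbeats 1000000 in
theorem simulate_growth_spec : Claim_equal_simulate_growth := by
  intro days severity weather _
  unfold Spec_simulate_growth simulate_growth simulate_growth_alt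
  simp only [PySem.List.pyRange_one, sub_zero, List.foldl_map, List.map_map]
  set temp := ((weather.lookup "temperature").getD 30) with htemp
  set rain := ((weather.lookup "rainfall").getD 100) with hrain
  set dlt := (if temp > 35 then (-3 : Int) else if temp < 20 then -2 else 1)
           + (if rain > 150 then (-4 : Int) else if rain < 50 then -3 else 1)
           + ((([("high", (-8 : Int)), ("medium", -5), ("low", -2)] : List (String × Int)).lookup severity).getD 0)
      with hdlt
  have hstep : ∀ (st : Int × List (List (String × Int))) (k : Nat), k ∈ List.range days.toNat →
      (fun (st : Int × List (List (String × Int))) (k : Nat) =>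
        let h1 := if temp > 35 then st.1 - 3 else if temp < 20 then st.1 - 2 else st.1 + 1
        let h2 := if rain > 150 then h1 - 4 else if rain < 50 then h1 - 3 else h1 + 1
        let h3 := if severity == "high" then h2 - 8
                  else if severity == "medium" then h2 - 5
                  else if severity == "low" then h2 - 2 else h2
        let h4 := max 0 (min 100 h3)
        (h4, st.2 ++ [[("day", (0 : Int) + (k : Int) + 1), ("health", h4)]])) st k
      = (fun (st : Int × List (List (String × Int))) (k : Nat) =>
          let h4 := max 0 (min 100 (st.1 + dlt))
          (h4, st.2 ++ [[("day", (k : Int) + 1), ("health", h4)]])) st k := by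
    intro st k _
    simp only [hdlt, sev_table_eq, zero_add]
    split_ifs <;> norm_num <;> omega
  rw [PySem.List.foldl_congr_mem _ _ _ _ hstep, loop_closed]
  simp [pvRec, hdlt]
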